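-- pv_equiv track=rewrite | github.com/pointerrrr/datadmining | tree.py | find_splits
-- ===== SOURCE A (Python) =====
-- def find_splits(x, splitIndex):
--     splits = []
--     prev = x[0]
--     for i in range(1,len(x)):
--         if x[i][splitIndex] != prev[splitIndex]:
--             splits.append(i)
--             prev = x[i]
--
--     return splits
-- ===== SOURCE B (Python) =====
-- def find_splits(x, splitIndex):
--     # run-length scan over the pre-extracted key column: skip each run of equal
--     # keys and record the position where the next run starts.
--     keys = [row[splitIndex] for row in x]
--     n = len(keys)
--     splits = []
--     pos = 0
--     while pos < n:
--         k = keys[pos]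
--         while pos < n and keys[pos] == k:
--             pos += 1
--         if pos < n:
--             splits.append(pos)
--     return splits
-- ===== Notes on version B (the rewrite author's own statement) =====
-- stated objective: alternative
-- what changed: B first extracts the key column into a list, then does a run-length scan (inner loop skipping each run of equal keys) recording where each new run starts, instead of A's single pass carrying the previous representative row.
-- outside the precondition, e.g. on find_splits([[]], 0): A returns [], B raises IndexError
import Mathlib
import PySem

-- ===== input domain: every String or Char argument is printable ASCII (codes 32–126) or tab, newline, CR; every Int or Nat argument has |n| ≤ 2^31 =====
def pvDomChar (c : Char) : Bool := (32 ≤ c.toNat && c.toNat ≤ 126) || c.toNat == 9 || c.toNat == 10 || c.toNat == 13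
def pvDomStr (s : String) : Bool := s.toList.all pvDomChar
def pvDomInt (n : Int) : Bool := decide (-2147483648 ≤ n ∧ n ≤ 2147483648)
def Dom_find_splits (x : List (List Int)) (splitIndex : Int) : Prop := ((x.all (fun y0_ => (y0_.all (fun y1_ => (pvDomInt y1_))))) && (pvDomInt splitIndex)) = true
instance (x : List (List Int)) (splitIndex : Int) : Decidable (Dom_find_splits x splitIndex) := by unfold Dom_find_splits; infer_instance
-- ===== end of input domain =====

-- B replaces A's representative-row single pass by a run-length scan over the pre-extracted key column (alternative decomposition, same cost).


-- row[splitIndex]; the default 0 is never reached under Pre_ (index in range for every row)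
def pvKey (row : List Int) (splitIndex : Int) : Int :=
  (PySem.List.pyGet? row splitIndex).getD 0

-- ===== PORT A =====
-- splits = []; prev = x[0]; for i in range(1, len(x)): if x[i][si] != prev[si]: splits.append(i); prev = x[i]
def find_splits (x : List (List Int)) (splitIndex : Int) : List Int :=
  ((PySem.List.pyRange 1 (x.length : Int) 1).foldl
    (fun (st : List Int × List Int) i =>
      let xi := PySem.List.pyGetD x i []
      if pvKey xi splitIndex ≠ pvKey st.2 splitIndex then (st.1 ++ [i], xi) else st)
    (([] : List Int), PySem.List.pyGetD x 0 [])).1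

-- ===== PORT B =====
-- Source B's outer while over the key column: the inner while that skips the run of keys
-- equal to the run head is the dropWhile; pos advances by the number of skipped keys;
-- fuel = number of keys, consumed at least one per outer iteration (totality only)
def find_splits_alt_go : Nat → List Int → Int → Int → List Int
  | _, [], _, _ => []
  | 0, _ :: _, _, _ => []
  | fuel + 1, k :: rest, n, pos =>
    if pos + (1 + ((rest.length : Int) - ((rest.dropWhile (fun y => y == k)).length : Int))) < n then
      (pos + (1 + ((rest.length : Int) - ((rest.dropWhile (fun y => y == k)).length : Int)))) ::
        find_splits_alt_go fuel (rest.dropWhile (fun y => y == k)) n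
          (pos + (1 + ((rest.length : Int) - ((rest.dropWhile (fun y => y == k)).length : Int))))
    else
      find_splits_alt_go fuel (rest.dropWhile (fun y => y == k)) n
        (pos + (1 + ((rest.length : Int) - ((rest.dropWhile (fun y => y == k)).length : Int))))

-- keys = [row[splitIndex] for row in x]; then the run-length scan from pos = 0
def find_splits_alt (x : List (List Int)) (splitIndex : Int) : List Int :=
  find_splits_alt_go x.length (x.map (fun row => pvKey row splitIndex)) (x.length : Int) 0

-- ===== PRECONDITION & SPEC =====
-- Python A raises IndexError on empty x (at x[0]) and on any row lacking splitIndex.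
-- This also excludes single-row x whose one row lacks splitIndex, where A returns []
-- without touching the column but B's eager key extraction raises IndexError (cited).
def Pre_find_splits (x : List (List Int)) (splitIndex : Int) : Prop :=
  x ≠ [] ∧ ∀ row ∈ x, PySem.Raise.InRange row.length splitIndex
instance (x : List (List Int)) (splitIndex : Int) : Decidable (Pre_find_splits x splitIndex) := by
  unfold Pre_find_splits; infer_instance
def pvWitness_find_splits : List (List Int) × Int := ([[1], [2], [2]], 0)

def Spec_find_splits (x : List (List Int)) (splitIndex : Int) (out : List Int) : Prop := out = find_splits_alt x splitIndex
instance (x : List (List Int)) (splitIndex : Int) (out : List Int) : Decidable (Spec_find_splits x splitIndex out) := by unfold Spec_find_splits; infer_instance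

-- ===== CLAIM (what is proved, stated in full; the proofs are below) =====
def Claim_equal_find_splits : Prop := ∀ (x : List (List Int)) (splitIndex : Int), Dom_find_splits x splitIndex → Pre_find_splits x splitIndex → Spec_find_splits x splitIndex (find_splits x splitIndex)

-- ===== LEMMAS AND PROOFS =====

-- reference: indices where the key changes, walking the key list carrying the previous key
def pvLa : List Int → Int → Int → List Int
  | [], _, _ => []
  | k :: t, pk, j => if k ≠ pk then j :: pvLa t k (j + 1) else pvLa t pk (j + 1)

theorem pvLa_skip (t u : List Int) (pk : Int) (h : ∀ y ∈ t, y = pk) : ∀ (j : Int),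
    pvLa (t ++ u) pk j = pvLa u pk (j + t.length) := by
  induction t with
  | nil => simp
  | cons a t ih =>
    intro j
    have ha : a = pk := h a List.mem_cons_self
    have h' : ∀ y ∈ t, y = pk := fun y hy => h y (List.mem_cons_of_mem _ hy)
    simp only [List.cons_append, pvLa, ha, ne_eq, not_true_eq_false, ite_false, if_false]
    rw [ih h' (j + 1)]
    congr 1
    simp only [List.length_cons]
    push_cast
    omega

theorem pvGo_eq : ∀ (fuel : Nat) (k : Int) (rest : List Int) (pos n : Int),
    rest.length ≤ fuel → n = pos + 1 + rest.length →
    find_splits_alt_go (fuel + 1) (k :: rest) n pos = pvLa rest k (pos + 1) := by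
  intro fuel
  induction fuel with
  | zero =>
    intro k rest pos n hm hn
    have hr : rest = [] := List.eq_nil_of_length_eq_zero (Nat.le_zero.mp hm)
    subst hr
    simp only [List.length_nil, Int.natCast_zero, add_zero] at hn
    simp [find_splits_alt_go, pvLa, hn]
  | succ f ih =>
    intro k rest pos n hm hn
    have hsplit : rest.takeWhile (fun y => y == k) ++ rest.dropWhile (fun y => y == k) = rest :=
      List.takeWhile_append_dropWhile
    have hlen : (rest.takeWhile (fun y => y == k)).length + (rest.dropWhile (fun y => y == k)).length = rest.length := by
      conv_rhs => rw [← hsplit]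
      exact (List.length_append).symm
    have htake : ∀ y ∈ rest.takeWhile (fun y => y == k), y = k := by
      intro y hy
      simpa using List.mem_takeWhile_imp hy
    have hla : pvLa rest k (pos + 1) =
        pvLa (rest.dropWhile (fun y => y == k)) k (pos + 1 + (rest.takeWhile (fun y => y == k)).length) := by
      conv_lhs => rw [← hsplit]
      exact pvLa_skip _ _ _ htake _
    rw [find_splits_alt_go]
    cases hdw : rest.dropWhile (fun y => y == k) with
    | nil =>
      rw [hdw] at hlen hla
      have hpos : pos + (1 + ((rest.length : Int) - (([] : List Int).length : Int))) = n := by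
        simp only [List.length_nil, Nat.add_zero] at hlen ⊢
        omega
      rw [hpos, if_neg (lt_irrefl n)]
      rw [hla]
      simp [find_splits_alt_go, pvLa]
    | cons k' t' =>
      rw [hdw] at hlen hla
      have hk' : (k' == k) = false := by
        have := List.head_dropWhile_not (fun y => y == k) (l := rest) (by simp [hdw])
        simpa [hdw] using this
      have hk'ne : k' ≠ k := by simpa using hk'
      simp only [List.length_cons] at hlen
      have hpos2 : pos + (1 + ((rest.length : Int) - (((k' :: t').length : Int)))) =
          pos + 1 + ((rest.takeWhile (fun y => y == k)).length : Int) := by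
        simp only [List.length_cons]
        push_cast
        omega
      rw [hpos2]
      have hlt : pos + 1 + ((rest.takeWhile (fun y => y == k)).length : Int) < n := by omega
      rw [if_pos hlt]
      rw [ih k' t' (pos + 1 + ((rest.takeWhile (fun y => y == k)).length : Int)) n (by omega) (by omega)]
      rw [hla]
      simp [pvLa, hk'ne]

-- A's fold over range(1, len x), started at drop j, computes pvLa over the key suffix
theorem pvFold_eq (x : List (List Int)) (si : Int) :
    ∀ (t : List (List Int)), ∀ (j : Int) (s p : List Int),
    0 ≤ j → j ≤ (x.length : Int) → x.drop j.toNat = t →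
    ((PySem.List.pyRange j (x.length : Int) 1).foldl
      (fun (st : List Int × List Int) i =>
        let xi := PySem.List.pyGetD x i []
        if pvKey xi si ≠ pvKey st.2 si then (st.1 ++ [i], xi) else st)
      (s, p)).1
    = s ++ pvLa (t.map (fun r => pvKey r si)) (pvKey p si) j := by
  intro t
  induction t with
  | nil =>
    intro j s p h0 hle hdrop
    have hlen : x.length ≤ j.toNat := List.drop_eq_nil_iff.mp hdrop
    have hj : (x.length : Int) ≤ j := by omega
    rw [PySem.List.pyRange_one_eq_nil hj]
    simp [pvLa]
  | cons r t ih =>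
    intro j s p h0 hle hdrop
    have hjt : j.toNat < x.length := by
      by_contra hc
      push_neg at hc
      rw [List.drop_eq_nil_of_le hc] at hdrop
      simp at hdrop
    have hjlt : j < (x.length : Int) := by omega
    have h1 : x[j.toNat]? = some r := by
      have h2 : (x.drop j.toNat)[0]? = x[j.toNat + 0]? := List.getElem?_drop
      rw [hdrop] at h2
      simpa using h2.symm
    have hget : PySem.List.pyGetD x j ([] : List Int) = r := by
      rw [show j = (j.toNat : Int) from (Int.toNat_of_nonneg h0).symm, PySem.List.pyGetD_natCast]
      simp [List.getD_eq_getElem?_getD, h1]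
    have hdrop' : x.drop (j + 1).toNat = t := by
      have hcg := congrArg (List.drop 1) hdrop
      simp only [List.drop_drop] at hcg
      rw [show (j + 1).toNat = j.toNat + 1 from by omega]
      simpa using hcg
    rw [PySem.List.pyRange_one_cons hjlt, List.foldl_cons]
    simp only [hget]
    by_cases hk : pvKey r si ≠ pvKey p si
    · rw [if_pos hk]
      rw [ih (j + 1) (s ++ [j]) r (by omega) (by omega) hdrop']
      simp only [List.map_cons, pvLa, ne_eq, hk, not_false_eq_true, if_pos]
      rw [List.append_assoc]
      rfl
    · rw [if_neg hk]
      rw [ih (j + 1) s p (by omega) (by omega) hdrop']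
      push_neg at hk
      simp [List.map_cons, pvLa, hk]

-- ===== VERDICT (by name: the statement is the Claim_ definition above) =====
theorem find_splits_spec : Claim_equal_find_splits := by
  intro x si _hDom hPre
  unfold Spec_find_splits
  cases x with
  | nil => exact absurd rfl hPre.1
  | cons r rs =>
    unfold find_splits
    rw [show PySem.List.pyGetD (r :: rs) 0 ([] : List Int) = r from PySem.List.pyGetD_zero_cons r rs []]
    rw [pvFold_eq (r :: rs) si rs 1 [] r (by omega) (by simp) (by rfl)]
    unfold find_splits_alt
    simp only [List.map_cons, List.length_cons]
    rw [pvGo_eq rs.length (pvKey r si) (rs.map (fun row => pvKey row si)) 0 ((rs.length + 1 : Nat) : Int)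
      (by simp) (by simp; omega)]
    simp
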